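-- pv_equiv track=rewrite | github.com/lfang1/aware_narrator | aware_narrator.py | calculate_revisit_counts_from_sequence
-- ===== SOURCE A (Python) =====
-- def calculate_revisit_counts_from_sequence(simplified_sequence):
--     """
--     Calculate revisit counts from a simplified app sequence.
--     A revisit occurs when an app appears again after a different app.
--
--     Args:
--         simplified_sequence: List of app names in order
--
--     Returns:
--         dict: App name -> revisit count
--     """
--     revisit_counts = {}
--     seen_apps = set()
--
--     for app_name in simplified_sequence:
--         if app_name in seen_apps:
--             # This is a revisit (app appeared before)
--             revisit_counts[app_name] = revisit_counts.get(app_name, 0) + 1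
--         else:
--             # First time seeing this app in the sequence
--             seen_apps.add(app_name)
--             revisit_counts[app_name] = 0
--
--     return revisit_counts
-- ===== SOURCE B (Python) =====
-- def calculate_revisit_counts_from_sequence(simplified_sequence):
--     """Count-all-then-transform: one tally pass, then revisits = count - 1."""
--     counts = {}
--     for app in simplified_sequence:
--         counts[app] = counts.get(app, 0) + 1
--     return {app: c - 1 for app, c in counts.items()}
-- ===== Notes on version B (the rewrite author's own statement) =====
-- stated objective: simpler
-- what changed: Replaces A's seen-set with per-element revisit/first-visit branching by a two-pass count-all-then-transform: one plain frequency tally, then a comprehension mapping each count to count-1 (insertion order of first appearances is preserved).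
import Mathlib
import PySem

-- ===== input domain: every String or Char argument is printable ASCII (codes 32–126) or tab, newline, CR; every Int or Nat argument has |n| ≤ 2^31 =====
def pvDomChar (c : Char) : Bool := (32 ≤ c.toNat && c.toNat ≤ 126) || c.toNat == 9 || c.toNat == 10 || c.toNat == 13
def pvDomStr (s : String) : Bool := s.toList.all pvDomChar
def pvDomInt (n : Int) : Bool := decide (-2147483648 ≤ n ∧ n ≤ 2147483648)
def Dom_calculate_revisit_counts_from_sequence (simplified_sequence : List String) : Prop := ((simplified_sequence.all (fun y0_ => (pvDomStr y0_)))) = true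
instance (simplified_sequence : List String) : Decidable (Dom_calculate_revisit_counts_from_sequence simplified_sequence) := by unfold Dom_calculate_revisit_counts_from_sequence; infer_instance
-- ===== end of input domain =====

-- B replaces A's seen-set and revisit/first-visit branch by a two-pass count-then-transform (simpler decomposition).


-- ===== PORT A =====
-- A's loop: state (revisit_counts, seen_apps); branch on membership in the set.
def pvLoopA : List String → PySem.Dict String Int → PySem.Set String → PySem.Dict String Int
  | [], d, _ => d
  | a :: rest, d, s =>
    if PySem.Set.contains s a then
      pvLoopA rest (d.insert a (d.getD a 0 + 1)) s
    else
      pvLoopA rest (d.insert a 0) (PySem.Set.add s a)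

def calculate_revisit_counts_from_sequence (simplified_sequence : List String) : List (String × Int) :=
  (pvLoopA simplified_sequence PySem.Dict.empty PySem.Set.empty).items

-- ===== PORT B =====
-- B: tally pass (counts[app] = counts.get(app, 0) + 1), then the comprehension {app: c - 1}.
def calculate_revisit_counts_from_sequence_alt (simplified_sequence : List String) : List (String × Int) :=
  ((simplified_sequence.foldl (fun d x => d.insert x (d.getD x 0 + 1)) PySem.Dict.empty).items).map
    (fun p => (p.1, p.2 - 1))

-- ===== PRECONDITION & SPEC =====
def Spec_calculate_revisit_counts_from_sequence (simplified_sequence : List String) (out : List (String × Int)) : Prop := out = calculate_revisit_counts_from_sequence_alt simplified_sequence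
instance (simplified_sequence : List String) (out : List (String × Int)) : Decidable (Spec_calculate_revisit_counts_from_sequence simplified_sequence out) := by unfold Spec_calculate_revisit_counts_from_sequence; infer_instance

-- ===== CLAIM (what is proved, stated in full; the proofs are below) =====
def Claim_equal_calculate_revisit_counts_from_sequence : Prop := ∀ (simplified_sequence : List String), Dom_calculate_revisit_counts_from_sequence simplified_sequence → Spec_calculate_revisit_counts_from_sequence simplified_sequence (calculate_revisit_counts_from_sequence simplified_sequence)

-- ===== LEMMAS AND PROOFS =====

-- Invariant: A's dict has the same keys as the tally dict, each value one less; the seen-set IS the key list.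
theorem pvLoopA_items (xs : List String) :
    ∀ (d d' : PySem.Dict String Int) (s : PySem.Set String),
    d.keys = d'.keys →
    (∀ k, d.get? k = (d'.get? k).map (fun v => v - 1)) →
    s = d'.keys →
    d'.keys.Nodup →
    (pvLoopA xs d s).items =
      ((xs.foldl (fun d x => d.insert x (d.getD x 0 + 1)) d').items).map (fun p => (p.1, p.2 - 1)) := by
  induction xs with
  | nil =>
    intro d d' s H1 H2 _ H4
    simp only [pvLoopA, List.foldl]
    rw [PySem.Dict.items_eq_map_keys d (H1 ▸ H4) 0,
        PySem.Dict.items_eq_map_keys d' H4 0, List.map_map, H1]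
    apply List.map_congr_left
    intro k hk
    have hsome : (d'.get? k).isSome := by
      rcases h : d'.get? k with _ | v
      · exact absurd hk ((PySem.Dict.get?_eq_none_iff_not_mem_keys d' k).mp h)
      · simp
    rcases h : d'.get? k with _ | v
    · rw [h] at hsome; simp at hsome
    · have hd : d.get? k = some (v - 1) := by rw [H2 k, h]; rfl
      simp [PySem.Dict.getD_eq_get?_getD, h, hd]
  | cons a rest ih =>
    intro d d' s H1 H2 H3 H4
    have hc : PySem.Set.contains s a = d'.contains a := by
      rw [H3, PySem.Dict.contains_eq_decide_mem_keys]
      simp [PySem.Set.contains]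
    by_cases hmem : d'.contains a = true
    · -- revisit branch
      simp only [pvLoopA, List.foldl, hc, hmem, if_true]
      apply ih
      · rw [PySem.Dict.keys_insert_of_contains _ _
              (by rw [PySem.Dict.contains_eq_decide_mem_keys, H1,
                      ← PySem.Dict.contains_eq_decide_mem_keys]; exact hmem),
            PySem.Dict.keys_insert_of_contains _ _ hmem, H1]
      · intro k
        rw [PySem.Dict.get?_insert, PySem.Dict.get?_insert]
        by_cases hk : k = a
        · subst hk
          simp only [if_true, Option.map_some]
          congr 1
          rcases h : d'.get? k with _ | v
          · rw [PySem.Dict.contains_eq_isSome_get?, h] at hmem; simp at hmem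
          · have hd : d.get? k = some (v - 1) := by rw [H2 k, h]; rfl
            simp [PySem.Dict.getD_eq_get?_getD, h, hd]
        · simp only [hk, if_false]; exact H2 k
      · rw [H3, PySem.Dict.keys_insert_of_contains _ _ hmem]
      · rw [PySem.Dict.keys_insert_of_contains _ _ hmem]; exact H4
    · -- first-visit branch
      have hmem' : d.contains a = false := by
        rw [PySem.Dict.contains_eq_decide_mem_keys, H1,
            ← PySem.Dict.contains_eq_decide_mem_keys]
        simpa using hmem
      have hmemf : d'.contains a = false := by simpa using hmem
      simp only [pvLoopA, List.foldl, hc, hmemf, if_false, Bool.false_eq_true]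
      apply ih
      · rw [PySem.Dict.keys_insert_of_not_contains _ _ hmem',
            PySem.Dict.keys_insert_of_not_contains _ _ hmemf, H1]
      · intro k
        rw [PySem.Dict.get?_insert, PySem.Dict.get?_insert]
        by_cases hk : k = a
        · subst hk
          have : d'.getD k 0 = 0 := PySem.Dict.getD_of_not_contains _ _ hmemf
          simp [this]
        · simp only [hk, if_false]; exact H2 k
      · rw [H3, PySem.Dict.keys_insert_of_not_contains _ _ hmemf]
        simp [PySem.Set.add, PySem.Set.contains, PySem.Dict.contains_eq_decide_mem_keys] at hmemf ⊢
        simp [hmemf]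
      · rw [PySem.Dict.keys_insert_of_not_contains _ _ hmemf]
        refine List.Nodup.append H4 (List.nodup_singleton a) ?_
        intro x hx hy
        simp at hy
        subst hy
        rw [PySem.Dict.contains_eq_decide_mem_keys] at hmemf
        simp at hmemf
        exact hmemf hx

-- ===== VERDICT (by name: the statement is the Claim_ definition above) =====
theorem calculate_revisit_counts_from_sequence_spec : Claim_equal_calculate_revisit_counts_from_sequence := by
  intro xs _
  unfold Spec_calculate_revisit_counts_from_sequence
  unfold calculate_revisit_counts_from_sequence calculate_revisit_counts_from_sequence_alt
  exact pvLoopA_items xs PySem.Dict.empty PySem.Dict.empty PySem.Set.empty rfl (by simp [PySem.Dict.get?_empty]) rfl (by simp [PySem.Dict.keys_empty])
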